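-- pv_equiv track=rewrite | github.com/ochavarria/Proyectos-TEC | Progras/Python/Introduccion/Calendario.py | buscando_AyF2
-- ===== SOURCE A (Python) =====
-- def pertenece(lista,inp):
--     if(lista==[]):
--         return False
--     else:
--         if(lista[0]==inp):
--             return True
--         else:
--             return pertenece(lista[1:],inp)
--
-- def buscando_AyF2(lista,Fecha,Apellido):
--     if(lista==[]):
--         return []
--     else:
--         if(pertenece(lista[0],Fecha)and(pertenece(lista[0],Apellido))):
--             return lista[0]+list('   ') + buscando_AyF2(lista[1:],Fecha,Apellido)
--
--         else:
--             return buscando_AyF2(lista[1:],Fecha,Apellido)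
-- ===== SOURCE B (Python) =====
-- def buscando_AyF2(lista, Fecha, Apellido):
--     resultado = []
--     for sub in lista:
--         if Fecha in sub and Apellido in sub:
--             resultado += sub + [' ', ' ', ' ']
--     return resultado
-- ===== Notes on version B (the rewrite author's own statement) =====
-- stated objective: simpler
-- what changed: Replaces A's double recursion (recursive pertenece membership helper and recursion over the list tail, each step slicing the list) with a single iterative accumulator loop using the built-in 'in' operator.
import Mathlib
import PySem

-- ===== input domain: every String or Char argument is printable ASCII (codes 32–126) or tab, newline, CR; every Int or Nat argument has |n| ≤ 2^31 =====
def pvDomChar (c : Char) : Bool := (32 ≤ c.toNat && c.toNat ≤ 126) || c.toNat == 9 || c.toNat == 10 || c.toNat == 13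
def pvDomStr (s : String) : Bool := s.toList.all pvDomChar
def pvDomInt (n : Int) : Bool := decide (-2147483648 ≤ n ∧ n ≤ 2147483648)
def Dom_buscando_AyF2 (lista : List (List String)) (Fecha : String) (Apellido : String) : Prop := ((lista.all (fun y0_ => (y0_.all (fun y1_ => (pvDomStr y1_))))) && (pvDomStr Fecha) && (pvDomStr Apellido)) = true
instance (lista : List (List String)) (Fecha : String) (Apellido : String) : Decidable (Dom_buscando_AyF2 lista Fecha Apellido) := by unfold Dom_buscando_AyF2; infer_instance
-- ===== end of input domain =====

-- B replaces A's recursion (including the recursive membership helper) with one iterative accumulator loop using built-in membership: simpler.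


-- ===== PORT A =====
-- A-side helper: literal port of recursive `pertenece`
def pertenece (lista : List String) (inp : String) : Bool :=
  match lista with
  | [] => false
  | x :: rest => if x == inp then true else pertenece rest inp

def buscando_AyF2 (lista : List (List String)) (Fecha : String) (Apellido : String) : List String :=
  match lista with
  | [] => []
  | sub :: rest =>
    if pertenece sub Fecha && pertenece sub Apellido then
      sub ++ [" ", " ", " "] ++ buscando_AyF2 rest Fecha Apellido
    else
      buscando_AyF2 rest Fecha Apellido

-- ===== PORT B =====
-- B: single iterative loop with an accumulator, membership via `in` (List.contains)
def buscando_AyF2_alt (lista : List (List String)) (Fecha : String) (Apellido : String) : List String :=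
  lista.foldl
    (fun resultado sub =>
      if sub.contains Fecha && sub.contains Apellido then
        resultado ++ (sub ++ [" ", " ", " "])
      else resultado)
    []

-- ===== PRECONDITION & SPEC =====
def Spec_buscando_AyF2 (lista : List (List String)) (Fecha : String) (Apellido : String) (out : List String) : Prop := out = buscando_AyF2_alt lista Fecha Apellido
instance (lista : List (List String)) (Fecha : String) (Apellido : String) (out : List String) : Decidable (Spec_buscando_AyF2 lista Fecha Apellido out) := by unfold Spec_buscando_AyF2; infer_instance

-- ===== CLAIM (what is proved, stated in full; the proofs are below) =====
def Claim_equal_buscando_AyF2 : Prop := ∀ (lista : List (List String)) (Fecha : String) (Apellido : String), Dom_buscando_AyF2 lista Fecha Apellido → Spec_buscando_AyF2 lista Fecha Apellido (buscando_AyF2 lista Fecha Apellido)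

-- ===== LEMMAS AND PROOFS =====

-- ===== VERDICT (by name: the statement is the Claim_ definition above) =====
theorem pertenece_eq_contains (lista : List String) (inp : String) :
    pertenece lista inp = lista.contains inp := by
  induction lista with
  | nil => rfl
  | cons x rest ih =>
    cases h : x == inp with
    | true =>
      have he : x = inp := beq_iff_eq.mp h
      simp [pertenece, he]
    | false =>
      have hne : ¬ inp = x := fun he => by simp [he] at h
      simp [pertenece, h, ih, hne]

theorem foldl_acc (lista : List (List String)) (Fecha Apellido : String) (acc : List String) :
    lista.foldl
      (fun resultado sub =>
        if sub.contains Fecha && sub.contains Apellido then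
          resultado ++ (sub ++ [" ", " ", " "])
        else resultado) acc
    = acc ++ buscando_AyF2 lista Fecha Apellido := by
  induction lista generalizing acc with
  | nil => simp [buscando_AyF2]
  | cons sub rest ih =>
    rw [List.foldl_cons, ih]
    by_cases hF : Fecha ∈ sub <;> by_cases hA : Apellido ∈ sub <;>
      simp [buscando_AyF2, pertenece_eq_contains, hF, hA]

theorem buscando_AyF2_spec : Claim_equal_buscando_AyF2 := by
  intro lista Fecha Apellido _
  unfold Spec_buscando_AyF2 buscando_AyF2_alt
  rw [foldl_acc]
  simp
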